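-- pv_equiv track=rewrite | github.com/saraivagustavo/LVPs | LVPs-Funções/lvpfuncao23.py | f_vogais
-- ===== SOURCE A (Python) =====
-- def f_naoExiste(letra,vogal):
--     for i in range(len(vogal)):
--         if(letra == vogal[i]):
--             return False
--     return True
--
-- def f_vogais(texto):
--     #declaração de variáveis
--     vogal = str("")
--     vogais = str("")
--     #inicialização da vaiável
--     vogal = 'AEIOU'
--     vogais = ''
--     for i in range (len(texto)):
--         for j in range(len(vogal)):
--             if(texto[i] == vogal[j]):
--                 if(f_naoExiste(texto[i],vogais) == True):
--                     vogais += texto[i]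
--     return vogais
-- ===== SOURCE B (Python) =====
-- def f_vogais(texto):
--     # Find each vowel's first-occurrence index, then reorder by it.
--     pares = []
--     for v in 'AEIOU':
--         i = texto.find(v)
--         if i != -1:
--             pares.append((i, v))
--     pares.sort(key=lambda p: p[0])
--     return ''.join(v for _, v in pares)
-- ===== Notes on version B (the rewrite author's own statement) =====
-- stated objective: faster
-- what changed: Instead of a Python-level scan over every character with a per-character duplicate-check helper, B computes each of the five vowels' first-occurrence index with str.find, sorts the (index, vowel) pairs by index, and joins the vowels in that order.
import Mathlib
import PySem

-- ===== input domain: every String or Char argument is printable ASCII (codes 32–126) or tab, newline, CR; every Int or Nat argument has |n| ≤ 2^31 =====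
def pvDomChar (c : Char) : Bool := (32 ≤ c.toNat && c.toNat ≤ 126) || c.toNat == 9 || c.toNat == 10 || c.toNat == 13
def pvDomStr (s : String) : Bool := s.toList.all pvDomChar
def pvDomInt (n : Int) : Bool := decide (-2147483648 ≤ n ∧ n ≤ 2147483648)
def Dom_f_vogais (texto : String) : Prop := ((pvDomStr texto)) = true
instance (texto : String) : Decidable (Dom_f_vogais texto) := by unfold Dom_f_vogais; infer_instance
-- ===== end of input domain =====

-- B replaces A's single scan with per-character duplicate checks by computing each vowel's
-- first-occurrence index with str.find and sorting by it (measured faster in a timing run).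

-- ===== PORT A =====
def f_naoExiste (letra : Char) (vogal : List Char) : Bool :=
  match vogal with
  | [] => true
  | c :: rest => if letra == c then false else f_naoExiste letra rest

def f_vogais (texto : String) : String :=
  String.mk (texto.toList.foldl (fun vogais c =>
    (['A', 'E', 'I', 'O', 'U'] : List Char).foldl (fun acc vj =>
      if c == vj then (if f_naoExiste c acc = true then acc ++ [c] else acc) else acc)
      vogais) [])

-- ===== PORT B =====
def f_vogais_alt (texto : String) : String :=
  let pares := (['A', 'E', 'I', 'O', 'U'] : List Char).foldl (fun acc v =>
      let i := PySem.Str.find texto (String.singleton v)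
      if i ≠ -1 then acc ++ [(i, v)] else acc) ([] : List (Int × Char))
  String.mk ((PySem.List.sorted pares (fun p => p.1) false).map (fun p => p.2))

-- ===== PRECONDITION & SPEC =====
def Spec_f_vogais (texto : String) (out : String) : Prop := out = f_vogais_alt texto
instance (texto : String) (out : String) : Decidable (Spec_f_vogais texto out) := by unfold Spec_f_vogais; infer_instance

-- ===== CLAIM (what is proved, stated in full; the proofs are below) =====
def Claim_equal_f_vogais : Prop := ∀ (texto : String), Dom_f_vogais texto → Spec_f_vogais texto (f_vogais texto)

-- ===== LEMMAS AND PROOFS =====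

def pvVOW : List Char := ['A', 'E', 'I', 'O', 'U']

def pvStepD (acc : List Char) (c : Char) : List Char :=
  if c ∈ pvVOW ∧ c ∉ acc then acc ++ [c] else acc

def pvInner (c : Char) (acc : List Char) (vj : Char) : List Char :=
  if c == vj then (if f_naoExiste c acc = true then acc ++ [c] else acc) else acc

lemma pv_naoExiste_eq (c : Char) (a : List Char) : f_naoExiste c a = decide (c ∉ a) := by
  induction a with
  | nil => simp [f_naoExiste]
  | cons x xs ih =>
    simp only [f_naoExiste, ih]
    by_cases h : c = x <;> simp [h]

lemma pvInner_self (c : Char) (acc : List Char) (h : c ∉ acc) :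
    pvInner c acc c = acc ++ [c] := by
  simp [pvInner, pv_naoExiste_eq, h]

lemma pvInner_mem (c : Char) (acc : List Char) (w : Char) (h : c ∈ acc) :
    pvInner c acc w = acc := by
  simp only [pvInner, pv_naoExiste_eq, h]
  by_cases hw : c = w <;> simp [hw, h]

lemma pvInner_ne (c : Char) (acc : List Char) (w : Char) (h : c ≠ w) :
    pvInner c acc w = acc := by
  simp [pvInner, h]

lemma pv_inner_const (W : List Char) (acc : List Char) (c : Char) (h : c ∈ acc) :
    W.foldl (pvInner c) acc = acc := by
  induction W with
  | nil => rfl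
  | cons w ws ih =>
    rw [List.foldl_cons, pvInner_mem c acc w h]
    exact ih

lemma pv_inner_eq (W : List Char) (acc : List Char) (c : Char) :
    W.foldl (pvInner c) acc = if c ∈ W ∧ c ∉ acc then acc ++ [c] else acc := by
  induction W generalizing acc with
  | nil => simp
  | cons w ws ih =>
    rw [List.foldl_cons]
    by_cases hw : c = w
    · subst hw
      by_cases hmem : c ∈ acc
      · rw [pvInner_mem c acc c hmem, pv_inner_const ws acc c hmem, if_neg (by simp [hmem])]
      · rw [pvInner_self c acc hmem, pv_inner_const ws (acc ++ [c]) c (by simp),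
          if_pos ⟨by simp, hmem⟩]
    · rw [pvInner_ne c acc w hw, ih]
      simp [List.mem_cons, hw]

lemma pv_fold_eq (l : List Char) (acc : List Char) :
    l.foldl (fun vogais c => (['A', 'E', 'I', 'O', 'U'] : List Char).foldl (pvInner c) vogais) acc
      = l.foldl pvStepD acc := by
  induction l generalizing acc with
  | nil => rfl
  | cons x xs ih =>
    have hhead : (['A', 'E', 'I', 'O', 'U'] : List Char).foldl (pvInner x) acc = pvStepD acc x := by
      simp only [pv_inner_eq, pvStepD, pvVOW]
      rfl
    rw [List.foldl_cons, hhead, List.foldl_cons]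
    exact ih _

lemma pv_A_eq (texto : String) :
    f_vogais texto = String.mk (texto.toList.foldl pvStepD []) := by
  rw [show f_vogais texto = String.mk (texto.toList.foldl
      (fun vogais c => (['A', 'E', 'I', 'O', 'U'] : List Char).foldl (pvInner c) vogais) [])
    from rfl, pv_fold_eq]

lemma pv_idxOf_le {l : List Char} {v : Char} {k : Nat} (hk : k < l.length) (h : l[k] = v) :
    l.idxOf v ≤ k := by
  induction l generalizing k with
  | nil => simp at hk
  | cons x xs ih =>
    cases k with
    | zero =>
      simp only [List.getElem_cons_zero] at h
      rw [List.idxOf_cons_eq _ h]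
    | succ n =>
      by_cases hx : x = v
      · rw [List.idxOf_cons_eq _ hx]
        omega
      · rw [List.idxOf_cons_ne _ hx]
        have := ih (k := n) (by simpa using hk) (by simpa using h)
        omega

lemma pv_singleton_prefix_drop {l : List Char} {v : Char} {k : Nat} (hk : k < l.length) :
    ([v] <+: l.drop k) ↔ l[k] = v := by
  rw [List.drop_eq_getElem_cons hk]
  constructor
  · rintro ⟨t, ht⟩
    injection ht with h1 _
    exact h1.symm
  · intro h
    exact ⟨l.drop (k + 1), by simp [h]⟩

lemma pv_find_singleton (l : List Char) (v : Char) :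
    PySem.Chars.find l [v] = if v ∈ l then (l.idxOf v : Int) else -1 := by
  by_cases hmem : v ∈ l
  · have hinf : [v] <:+: l := by
      rw [List.singleton_infix_iff]; exact hmem
    have h0 : 0 ≤ PySem.Chars.find l [v] := by
      rw [PySem.Chars.find_nonneg_iff]; exact hinf
    obtain ⟨hpre, hmin⟩ := PySem.Chars.find_spec (s := l) (sub := [v]) h0
    set k := (PySem.Chars.find l [v]).toNat with hkdef
    have hklen : k < l.length := by
      by_contra hge
      push_neg at hge
      rw [List.drop_eq_nil_of_le hge] at hpre
      simp at hpre
    have hkv : l[k] = v := (pv_singleton_prefix_drop hklen).mp hpre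
    have h1 : l.idxOf v ≤ k := pv_idxOf_le hklen hkv
    have h2 : k ≤ l.idxOf v := by
      by_contra hlt
      push_neg at hlt
      have hidx : l.idxOf v < l.length := List.idxOf_lt_length_of_mem hmem
      exact hmin (l.idxOf v) hlt ((pv_singleton_prefix_drop hidx).mpr (List.getElem_idxOf hidx))
    have hk : k = l.idxOf v := le_antisymm h2 h1
    rw [if_pos hmem, ← hk, hkdef]
    omega
  · rw [if_neg hmem, PySem.Chars.find_eq_neg_one_iff, List.singleton_infix_iff]
    exact hmem

lemma pv_dedup_inv (l : List Char) :
    (l.foldl pvStepD []).Nodup ∧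
    (∀ v, v ∈ l.foldl pvStepD [] ↔ v ∈ pvVOW ∧ v ∈ l) ∧
    (l.foldl pvStepD []).Pairwise (fun a b => l.idxOf a < l.idxOf b) := by
  induction l using List.reverseRecOn with
  | nil => simp
  | append_singleton l c ih =>
    obtain ⟨hnd, hmem, hpw⟩ := ih
    rw [List.foldl_append, List.foldl_cons, List.foldl_nil]
    have hsub : ∀ v, v ∈ l.foldl pvStepD [] → v ∈ l := fun v hv => ((hmem v).mp hv).2
    by_cases hc : c ∈ pvVOW ∧ c ∉ l.foldl pvStepD []
    · have hcl : c ∉ l := fun hin => hc.2 ((hmem c).mpr ⟨hc.1, hin⟩)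
      rw [pvStepD, if_pos hc]
      refine ⟨?_, ?_, ?_⟩
      · simp [List.nodup_append, hnd]
        exact fun a ha h => hc.2 (h ▸ ha)
      · intro v
        simp only [List.mem_append, List.mem_singleton, hmem]
        constructor
        · rintro (⟨h1, h2⟩ | rfl)
          · exact ⟨h1, Or.inl h2⟩
          · exact ⟨hc.1, Or.inr rfl⟩
        · rintro ⟨h1, h2 | rfl⟩
          · exact Or.inl ⟨h1, h2⟩
          · exact Or.inr rfl
      · rw [List.pairwise_append]
        refine ⟨?_, by simp, ?_⟩
        · apply hpw.imp_of_mem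
          intro a b ha hb hab
          rw [List.idxOf_append_of_mem (hsub a ha), List.idxOf_append_of_mem (hsub b hb)]
          exact hab
        · intro a ha b hb
          simp only [List.mem_singleton] at hb
          subst hb
          rw [List.idxOf_append_of_mem (hsub a ha), List.idxOf_append_of_notMem hcl]
          have h1 : l.idxOf a < l.length := List.idxOf_lt_length_of_mem (hsub a ha)
          rw [List.idxOf_cons_eq _ rfl]
          omega
    · rw [pvStepD, if_neg hc]
      refine ⟨hnd, ?_, ?_⟩
      · intro v
        rw [hmem]
        simp only [List.mem_append, List.mem_singleton]
        constructor
        · rintro ⟨h1, h2⟩; exact ⟨h1, Or.inl h2⟩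
        · rintro ⟨h1, h2 | rfl⟩
          · exact ⟨h1, h2⟩
          · rcases not_and_or.mp hc with h | h
            · exact absurd h1 h
            · exact ⟨h1, hsub _ (not_not.mp h)⟩
      · apply hpw.imp_of_mem
        intro a b ha hb hab
        rw [List.idxOf_append_of_mem (hsub a ha), List.idxOf_append_of_mem (hsub b hb)]
        exact hab

lemma pv_pares_eq (g : Char → Int) (W : List Char) (acc : List (Int × Char)) :
    W.foldl (fun acc v =>
      let i := g v
      if i ≠ -1 then acc ++ [(i, v)] else acc) acc =
    acc ++ (W.filter (fun v => g v ≠ -1)).map (fun v => (g v, v)) := by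
  induction W generalizing acc with
  | nil => simp
  | cons w ws ih =>
    rw [List.foldl_cons, List.filter_cons]
    by_cases h : g w = -1
    · rw [show (let i := g w; if i ≠ -1 then acc ++ [(i, w)] else acc) = acc from by simp [h], ih]
      simp [h]
    · rw [show (let i := g w; if i ≠ -1 then acc ++ [(i, w)] else acc) = acc ++ [(g w, w)]
        from by simp [h], ih]
      simp [h]

-- ===== VERDICT (by name: the statement is the Claim_ definition above) =====
theorem f_vogais_spec : Claim_equal_f_vogais := by
  intro texto _
  unfold Spec_f_vogais f_vogais_alt
  rw [pv_pares_eq (fun v => PySem.Str.find texto (String.singleton v)), pv_A_eq]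
  simp only [List.nil_append]
  set l := texto.toList with hl
  set d := l.foldl pvStepD [] with hd
  obtain ⟨hnd, hmem, hpw⟩ := pv_dedup_inv l
  have hfind : ∀ v, PySem.Str.find texto (String.singleton v) = PySem.Chars.find l [v] := by
    intro v
    simp [hl]
  have hsub : ∀ v, v ∈ d → v ∈ l := fun v hv => ((hmem v).mp hv).2
  have hkey : ∀ v ∈ d, PySem.Str.find texto (String.singleton v) = (l.idxOf v : Int) := by
    intro v hv
    rw [hfind, pv_find_singleton, if_pos (hsub v hv)]
  have hsorted : PySem.List.sorted
      (((['A', 'E', 'I', 'O', 'U'] : List Char).filter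
          (fun v => PySem.Str.find texto (String.singleton v) ≠ -1)).map
        (fun v => (PySem.Str.find texto (String.singleton v), v)))
      (fun p => p.1) false =
      d.map (fun v => (PySem.Str.find texto (String.singleton v), v)) := by
    apply PySem.List.sorted_eq_of_perm_of_pairwise_lt
    · apply List.Perm.map
      have hfil : (['A', 'E', 'I', 'O', 'U'] : List Char).filter
            (fun v => PySem.Str.find texto (String.singleton v) ≠ -1) =
          (['A', 'E', 'I', 'O', 'U'] : List Char).filter (fun v => decide (v ∈ l)) := by
        apply List.filter_congr
        intro v _
        rw [hfind, pv_find_singleton]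
        by_cases hv : v ∈ l <;> simp [hv]
      rw [hfil]
      apply (List.perm_ext_iff_of_nodup hnd (List.Nodup.filter _ (by decide))).mpr
      intro v
      rw [hmem v, List.mem_filter]
      simp [pvVOW]
    · have hp : d.Pairwise (fun a b =>
          PySem.Str.find texto (String.singleton a) < PySem.Str.find texto (String.singleton b)) := by
        apply hpw.imp_of_mem
        intro a b ha hb hab
        rw [hkey a ha, hkey b hb]
        exact_mod_cast hab
      exact List.Pairwise.map _ (fun a b h => h) hp
  rw [hsorted, List.map_map]
  refine congrArg String.mk ?_
  exact ((List.map_congr_left fun v _ => rfl).trans (List.map_id d)).symm
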